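-- pv_equiv track=rewrite | github.com/Ryan-JW-Kim/Year3Sem2 | CP312/a2/main.py | find_end_of_right_segment
-- ===== SOURCE A (Python) =====
-- def find_end_of_right_segment(ls, left, right):
--
--     middle = (left + right) // 2
--
--     if left == middle:
--         return left
--
--     if ls[left] > ls[middle]:
--         return find_end_of_right_segment(ls, left, middle)
--
--     elif ls[middle] > ls[right]:
--         return find_end_of_right_segment(ls, middle, right)
-- ===== SOURCE B (Python) =====
-- def find_end_of_right_segment(ls, left, right):
--     # If the first probed triple is already in sorted order there is no
--     # boundary to find (the original reports None via fall-through).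
--     middle = (left + right) // 2
--     if left == middle:
--         return left
--     if ls[left] <= ls[middle] <= ls[right]:
--         return None
--     # Otherwise iterate: every window (left, right) from here on satisfies
--     # ls[left] > ls[right], so one comparison per step decides the half.
--     while middle != left:
--         if ls[left] > ls[middle]:
--             right = middle
--         else:
--             left = middle
--         middle = (left + right) // 2
--     return left
-- ===== Notes on version B (the rewrite author's own statement) =====
-- stated objective: alternative
-- what changed: Recursion replaced by a single up-front sorted-triple test (the only place None can arise) followed by a 'while middle != left' loop that uses the invariant ls[left] > ls[right] to decide each halving with one comparison and no ls[right] lookups.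
import Mathlib
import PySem

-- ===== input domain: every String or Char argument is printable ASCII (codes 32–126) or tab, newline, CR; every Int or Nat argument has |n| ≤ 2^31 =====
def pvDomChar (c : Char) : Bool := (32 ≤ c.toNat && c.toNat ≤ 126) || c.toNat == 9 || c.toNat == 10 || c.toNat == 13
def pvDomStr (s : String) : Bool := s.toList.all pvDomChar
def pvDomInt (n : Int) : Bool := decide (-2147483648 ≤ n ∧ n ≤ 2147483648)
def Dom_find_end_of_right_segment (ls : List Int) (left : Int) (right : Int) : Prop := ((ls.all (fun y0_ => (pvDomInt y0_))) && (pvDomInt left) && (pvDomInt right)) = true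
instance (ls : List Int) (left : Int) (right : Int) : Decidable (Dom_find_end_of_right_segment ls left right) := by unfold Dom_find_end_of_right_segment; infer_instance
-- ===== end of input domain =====

-- B replaces A's recursion by an iterative loop that, after the first full three-way step,
-- uses the invariant ls[left] > ls[right] to drop the third comparison (objective: alternative).


-- ===== PORT A =====
-- literal transliteration of A's recursion; fuel only makes the recursion total
-- (inside Pre_ the window shrinks each step, so fuel (right-left).toNat+1 never runs out);
-- none = Python's None / an exception.
def goA (ls : List Int) (left right : Int) : Nat → Option Int
  | 0 => none
  | fuel + 1 =>
    if left = PySem.Int.floordiv (left + right) 2 then some left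
    else
      match PySem.List.pyGet? ls left, PySem.List.pyGet? ls (PySem.Int.floordiv (left + right) 2) with
      | some vl, some vm =>
        if vl > vm then goA ls left (PySem.Int.floordiv (left + right) 2) fuel
        else
          match PySem.List.pyGet? ls right with
          | some vr => if vm > vr then goA ls (PySem.Int.floordiv (left + right) 2) right fuel else none
          | none => none
      | _, _ => none

def find_end_of_right_segment (ls : List Int) (left : Int) (right : Int) : Int :=
  (goA ls left right ((right - left).toNat + 1)).getD 0

-- ===== PORT B =====
-- Source B's 'while middle != left' loop (middle recomputed at the top of each pass):
-- one comparison per step, never reads ls[right]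
def loopB (ls : List Int) (left right : Int) : Nat → Option Int
  | 0 => none
  | fuel + 1 =>
    if left = PySem.Int.floordiv (left + right) 2 then some left
    else
      match PySem.List.pyGet? ls left, PySem.List.pyGet? ls (PySem.Int.floordiv (left + right) 2) with
      | some vl, some vm =>
        if vl > vm then loopB ls left (PySem.Int.floordiv (left + right) 2) fuel else loopB ls (PySem.Int.floordiv (left + right) 2) right fuel
      | _, _ => none

-- first step of Source B: the chained short-circuit test 'ls[left] <= ls[middle] <= ls[right]'
-- (sorted triple => None), then the loop
def goB (ls : List Int) (left right : Int) : Option Int :=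
  if left = PySem.Int.floordiv (left + right) 2 then some left
  else
    match PySem.List.pyGet? ls left, PySem.List.pyGet? ls (PySem.Int.floordiv (left + right) 2) with
    | some vl, some vm =>
      if vl ≤ vm then
        match PySem.List.pyGet? ls right with
        | some vr =>
          if vm ≤ vr then none
          else loopB ls (PySem.Int.floordiv (left + right) 2) right ((right - PySem.Int.floordiv (left + right) 2).toNat + 1)
        | none => none
      else loopB ls left (PySem.Int.floordiv (left + right) 2) ((PySem.Int.floordiv (left + right) 2 - left).toNat + 1)
    | _, _ => none

def find_end_of_right_segment_alt (ls : List Int) (left : Int) (right : Int) : Int :=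
  (goB ls left right).getD 0

-- ===== PRECONDITION & SPEC =====
-- Pre_ holds exactly on the inputs where the Python A returns an int: immediate base case,
-- or a valid first step whose branch fires (otherwise A returns None, raises IndexError,
-- or recurses forever).
def Pre_find_end_of_right_segment (ls : List Int) (left : Int) (right : Int) : Prop :=
  (left ≤ right ∧ right ≤ left + 1) ∨
  (left + 1 < right ∧ -(ls.length : Int) ≤ left ∧
   PySem.Int.floordiv (left + right) 2 < (ls.length : Int) ∧
   ((right < (ls.length : Int) ∧
      PySem.List.pyGetD ls (PySem.Int.floordiv (left + right) 2) 0 > PySem.List.pyGetD ls right 0) ∨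
    PySem.List.pyGetD ls left 0 > PySem.List.pyGetD ls (PySem.Int.floordiv (left + right) 2) 0))
instance (ls : List Int) (left : Int) (right : Int) : Decidable (Pre_find_end_of_right_segment ls left right) := by unfold Pre_find_end_of_right_segment; infer_instance

def pvWitness_find_end_of_right_segment : List Int × Int × Int := ([3, 4, 5, 1, 2], 0, 4)

def Spec_find_end_of_right_segment (ls : List Int) (left : Int) (right : Int) (out : Int) : Prop := out = find_end_of_right_segment_alt ls left right
instance (ls : List Int) (left : Int) (right : Int) (out : Int) : Decidable (Spec_find_end_of_right_segment ls left right out) := by unfold Spec_find_end_of_right_segment; infer_instance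

-- ===== CLAIM (what is proved, stated in full; the proofs are below) =====
def Claim_equal_find_end_of_right_segment : Prop := ∀ (ls : List Int) (left : Int) (right : Int), Dom_find_end_of_right_segment ls left right → Pre_find_end_of_right_segment ls left right → Spec_find_end_of_right_segment ls left right (find_end_of_right_segment ls left right)

-- ===== LEMMAS AND PROOFS =====

-- midpoint bounds, restated through ediv so omega can chew on them
theorem mid_lt (l r : Int) (h : l + 1 < r) :
    l < PySem.Int.floordiv (l + r) 2 ∧ PySem.Int.floordiv (l + r) 2 < r := by
  rw [PySem.Int.floordiv_eq_ediv_of_pos (by omega : (0:Int) < 2)]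
  omega

theorem mid_base (l r : Int) (h1 : l ≤ r) (h2 : r ≤ l + 1) :
    PySem.Int.floordiv (l + r) 2 = l := by
  rw [PySem.Int.floordiv_eq_ediv_of_pos (by omega : (0:Int) < 2)]
  omega

theorem pyGet?_some_of_inrange (ls : List Int) (i : Int)
    (h1 : -(ls.length : Int) ≤ i) (h2 : i < (ls.length : Int)) :
    ∃ v, PySem.List.pyGet? ls i = some v := by
  have : ¬ PySem.List.pyGet? ls i = none := by
    rw [PySem.List.pyGet?_eq_none_iff]
    intro hc
    exact hc ⟨h1, h2⟩
  cases hv : PySem.List.pyGet? ls i with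
  | none => exact absurd hv this
  | some v => exact ⟨v, rfl⟩

-- core: under the invariant ls[l] > ls[r] (valid indices, l < r), A's recursion and B's
-- steady-state loop agree, for any sufficient fuels
theorem goA_eq_loopB (ls : List Int) : ∀ (n : Nat) (l r : Int) (f1 f2 : Nat),
    (r - l).toNat ≤ n → (r - l).toNat < f1 → (r - l).toNat < f2 →
    -(ls.length : Int) ≤ l → r < (ls.length : Int) → l < r →
    (∀ vl vr, PySem.List.pyGet? ls l = some vl → PySem.List.pyGet? ls r = some vr → vr < vl) →
    goA ls l r f1 = loopB ls l r f2 := by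
  intro n
  induction n with
  | zero =>
    intro l r f1 f2 hn _ _ _ _ hlr _
    omega
  | succ n ih =>
    intro l r f1 f2 hn hf1 hf2 hvl hvr hlr hinv
    obtain ⟨f1', rfl⟩ : ∃ k, f1 = k + 1 := ⟨f1 - 1, by omega⟩
    obtain ⟨f2', rfl⟩ : ∃ k, f2 = k + 1 := ⟨f2 - 1, by omega⟩
    simp only [goA, loopB]
    by_cases hbase : l = PySem.Int.floordiv (l + r) 2
    · simp only [if_pos hbase]
    · simp only [if_neg hbase]
      have hm : l + 1 < r := by
        by_contra hc
        exact hbase (mid_base l r (by omega) (by omega)).symm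
      obtain ⟨hml, hmr⟩ := mid_lt l r hm
      set m := PySem.Int.floordiv (l + r) 2 with hmdef
      obtain ⟨vl, hvl'⟩ := pyGet?_some_of_inrange ls l hvl (by omega)
      obtain ⟨vm, hvm'⟩ := pyGet?_some_of_inrange ls m (by omega) (by omega)
      obtain ⟨vr, hvr'⟩ := pyGet?_some_of_inrange ls r (by omega) hvr
      rw [hvl', hvm', hvr']
      by_cases hcmp : vl > vm
      · simp only [if_pos hcmp]
        exact ih l m f1' f2' (by omega) (by omega) (by omega) hvl (by omega) hml
          (fun a b ha hb => by
            rw [hvl'] at ha; rw [hvm'] at hb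
            cases ha; cases hb; omega)
      · simp only [if_neg hcmp]
        have hinv' : vr < vl := hinv vl vr hvl' hvr'
        have hmr' : vm > vr := by omega
        simp only [if_pos hmr']
        exact ih m r f1' f2' (by omega) (by omega) (by omega) (by omega) hvr hmr
          (fun a b ha hb => by
            rw [hvm'] at ha; rw [hvr'] at hb
            cases ha; cases hb; omega)

-- ===== VERDICT (by name: the statement is the Claim_ definition above) =====
theorem find_end_of_right_segment_spec : Claim_equal_find_end_of_right_segment := by
  intro ls l r _ hpre
  unfold Spec_find_end_of_right_segment find_end_of_right_segment find_end_of_right_segment_alt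
  congr 1
  unfold Pre_find_end_of_right_segment at hpre
  rcases hpre with ⟨h1, h2⟩ | ⟨hm, hvl, hmlen, hbr⟩
  · -- base case: middle = left, both return some left
    have hmid := mid_base l r h1 h2
    simp only [goA, goB]
    rw [if_pos hmid.symm, if_pos hmid.symm]
  · -- first step fires a branch
    have hmid := mid_lt l r hm
    set m := PySem.Int.floordiv (l + r) 2 with hmdef
    have hne : l ≠ m := by omega
    obtain ⟨vl, hvl'⟩ := pyGet?_some_of_inrange ls l hvl (by omega)
    obtain ⟨vm, hvm'⟩ := pyGet?_some_of_inrange ls m (by omega) (by omega)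
    have hvlD : PySem.List.pyGetD ls l 0 = vl := by
      simp [PySem.List.pyGetD, hvl']
    have hvmD : PySem.List.pyGetD ls m 0 = vm := by
      simp [PySem.List.pyGetD, hvm']
    simp only [goA, goB, ← hmdef, if_neg hne, hvl', hvm']
    by_cases hcmp : vl > vm
    · simp only [if_pos hcmp, if_neg (by omega : ¬ vl ≤ vm)]
      exact goA_eq_loopB ls (m - l).toNat l m ((r - l).toNat) ((m - l).toNat + 1)
        (le_refl _) (by omega) (by omega) hvl (by omega) (by omega)
        (fun a b ha hb => by
          rw [hvl'] at ha; rw [hvm'] at hb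
          cases ha; cases hb; omega)
    · simp only [if_neg hcmp]
      -- the left comparison failed, so Pre_'s right disjunct must be the middle>right one
      rcases hbr with ⟨hr, hgt⟩ | hgt
      · obtain ⟨vr, hvr'⟩ := pyGet?_some_of_inrange ls r (by omega) hr
        have hvrD : PySem.List.pyGetD ls r 0 = vr := by
          simp [PySem.List.pyGetD, hvr']
        rw [hvmD, hvrD] at hgt
        rw [hvr']
        simp only [if_pos hgt, if_pos (by omega : vl ≤ vm), if_neg (by omega : ¬ vm ≤ vr)]
        exact goA_eq_loopB ls (r - m).toNat m r ((r - l).toNat) ((r - m).toNat + 1)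
          (le_refl _) (by omega) (by omega) (by omega) hr (by omega)
          (fun a b ha hb => by
            rw [hvm'] at ha; rw [hvr'] at hb
            cases ha; cases hb; omega)
      · rw [hvlD, hvmD] at hgt
        omega
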